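-- pv_equiv track=rewrite | github.com/adhithyan15/coding-adventures | code/packages/python/brotli/src/coding_adventures_brotli/__init__.py | _find_best_icc_copy
-- ===== SOURCE A (Python) =====
-- _ICC_TABLE: list[tuple[int, int, int, int]] = [
--     # (insert_base, insert_extra, copy_base, copy_extra)
--     (0,  0,   4, 0),  # 0
--     (0,  0,   5, 0),  # 1
--     (0,  0,   6, 0),  # 2
--     (0,  0,   8, 1),  # 3
--     (0,  0,  10, 1),  # 4
--     (0,  0,  14, 2),  # 5
--     (0,  0,  18, 2),  # 6
--     (0,  0,  26, 3),  # 7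
--     (0,  0,  34, 3),  # 8
--     (0,  0,  50, 4),  # 9
--     (0,  0,  66, 4),  # 10
--     (0,  0,  98, 5),  # 11
--     (0,  0, 130, 5),  # 12
--     (0,  0, 194, 6),  # 13
--     (0,  0, 258, 7),  # 14
--     (0,  0, 514, 8),  # 15
--     (1,  0,   4, 0),  # 16
--     (1,  0,   5, 0),  # 17
--     (1,  0,   6, 0),  # 18
--     (1,  0,   8, 1),  # 19
--     (1,  0,  10, 1),  # 20
--     (1,  0,  14, 2),  # 21
--     (1,  0,  18, 2),  # 22
--     (1,  0,  26, 3),  # 23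
--     (2,  0,   4, 0),  # 24
--     (2,  0,   5, 0),  # 25
--     (2,  0,   6, 0),  # 26
--     (2,  0,   8, 1),  # 27
--     (2,  0,  10, 1),  # 28
--     (2,  0,  14, 2),  # 29
--     (2,  0,  18, 2),  # 30
--     (2,  0,  26, 3),  # 31
--     (3,  1,   4, 0),  # 32
--     (3,  1,   5, 0),  # 33
--     (3,  1,   6, 0),  # 34
--     (3,  1,   8, 1),  # 35
--     (3,  1,  10, 1),  # 36
--     (3,  1,  14, 2),  # 37
--     (3,  1,  18, 2),  # 38
--     (3,  1,  26, 3),  # 39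
--     (5,  2,   4, 0),  # 40
--     (5,  2,   5, 0),  # 41
--     (5,  2,   6, 0),  # 42
--     (5,  2,   8, 1),  # 43
--     (5,  2,  10, 1),  # 44
--     (5,  2,  14, 2),  # 45
--     (5,  2,  18, 2),  # 46
--     (5,  2,  26, 3),  # 47
--     (9,  3,   4, 0),  # 48
--     (9,  3,   5, 0),  # 49
--     (9,  3,   6, 0),  # 50
--     (9,  3,   8, 1),  # 51
--     (9,  3,  10, 1),  # 52
--     (9,  3,  14, 2),  # 53
--     (9,  3,  18, 2),  # 54
--     (9,  3,  26, 3),  # 55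
--     (17, 4,   4, 0),  # 56
--     (17, 4,   5, 0),  # 57
--     (17, 4,   6, 0),  # 58
--     (17, 4,   8, 1),  # 59
--     (17, 4,  10, 1),  # 60
--     (17, 4,  14, 2),  # 61
--     (17, 4,  18, 2),  # 62
--     (0,  0,   0, 0),  # 63 sentinel
-- ]
--
-- def _find_best_icc_copy(insert_length: int, copy_length: int) -> int:
--     """Find the largest copy_length ≤ requested that has a valid ICC code.
--
--     The ICC table has gaps (e.g., copy=7 is not representable for any code).
--     This returns the largest encodable copy ≤ requested for the given insert.
--
--     Examples:
--         _find_best_icc_copy(0, 4)   → 4  (exact match)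
--         _find_best_icc_copy(0, 7)   → 6  (best below the gap 7)
--         _find_best_icc_copy(0, 258) → 258 (exact match)
--     """
--     best = 0
--     for code in range(63):
--         ib, ie, cb, ce = _ICC_TABLE[code]
--         if not (ib <= insert_length <= ib + (1 << ie) - 1):
--             continue
--         copy_max = cb + (1 << ce) - 1
--         if cb <= copy_length <= copy_max:
--             return copy_length        # exact match
--         if copy_max <= copy_length and copy_max > best:
--             best = copy_max
--     return max(best, _MIN_MATCH)
--
-- _MIN_MATCH:  int = 4
-- ===== SOURCE B (Python) =====
-- _MIN_MATCH = 4
--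
-- # Merged coverage intervals of encodable copy lengths, derived once from the ICC
-- # table: insert 0 matches the 16 long-copy codes (coverage up to 769), inserts
-- # 1..16 match buckets with the same 8 short-copy codes (up to 33), and inserts
-- # 17..32 match the last bucket, which lacks the (26, 3) code (up to 21).
-- # Adjacent code ranges are merged, so each list is short, sorted and disjoint.
-- _COPY_FULL = [(4, 6), (8, 11), (14, 21), (26, 41), (50, 81),
--               (98, 161), (194, 385), (514, 769)]
-- _COPY_SHORT = [(4, 6), (8, 11), (14, 21), (26, 33)]
-- _COPY_TINY = [(4, 6), (8, 11), (14, 21)]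
--
--
-- def _find_best_icc_copy(insert_length: int, copy_length: int) -> int:
--     """Largest encodable copy_length <= requested for this insert_length.
--
--     Scans the merged coverage intervals back to front: the first interval whose
--     lower end does not exceed the request answers it (clamp into the interval);
--     if none does, no copy <= request is encodable and the minimum match wins.
--     """
--     if not (0 <= insert_length <= 32):
--         return _MIN_MATCH
--     if insert_length == 0:
--         intervals = _COPY_FULL
--     elif insert_length <= 16:
--         intervals = _COPY_SHORT
--     else:
--         intervals = _COPY_TINY
--     for lo, hi in reversed(intervals):
--         if copy_length >= lo:
--             return min(copy_length, hi)
--     return _MIN_MATCH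
-- ===== Notes on version B (the rewrite author's own statement) =====
-- stated objective: alternative
-- what changed: Replaces A's 63-row table scan (insert-range test, bit-shift range computation, exact-match early return and running best) by a precomputed classification of insert_length into three buckets, each with a short merged list of encodable copy intervals scanned back to front with a single clamp min(copy_length, hi).
import Mathlib
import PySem

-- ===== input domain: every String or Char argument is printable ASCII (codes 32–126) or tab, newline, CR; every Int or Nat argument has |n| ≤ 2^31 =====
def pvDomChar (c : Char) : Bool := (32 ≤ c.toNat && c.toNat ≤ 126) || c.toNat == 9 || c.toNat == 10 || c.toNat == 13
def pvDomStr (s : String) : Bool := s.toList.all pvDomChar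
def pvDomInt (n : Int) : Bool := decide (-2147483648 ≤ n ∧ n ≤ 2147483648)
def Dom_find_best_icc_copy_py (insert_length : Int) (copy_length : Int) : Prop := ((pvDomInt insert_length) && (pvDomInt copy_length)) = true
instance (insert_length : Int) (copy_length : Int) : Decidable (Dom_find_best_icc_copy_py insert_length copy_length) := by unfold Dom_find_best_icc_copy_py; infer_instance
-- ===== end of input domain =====

-- B replaces A's 63-row table scan by a bucket classification of insert_length and a
-- back-to-front scan of a short precomputed list of merged encodable-copy intervals.

-- ===== PORT A =====
-- The first 63 rows of _ICC_TABLE (range(63) never reads the sentinel row 63):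
-- (insert_base, insert_extra, copy_base, copy_extra); 1 << e is ported as 2 ^ e (exact).
def pvIccTable : List (Int × Nat × Int × Nat) := [
  (0, 0, 4, 0), (0, 0, 5, 0), (0, 0, 6, 0), (0, 0, 8, 1),
  (0, 0, 10, 1), (0, 0, 14, 2), (0, 0, 18, 2), (0, 0, 26, 3),
  (0, 0, 34, 3), (0, 0, 50, 4), (0, 0, 66, 4), (0, 0, 98, 5),
  (0, 0, 130, 5), (0, 0, 194, 6), (0, 0, 258, 7), (0, 0, 514, 8),
  (1, 0, 4, 0), (1, 0, 5, 0), (1, 0, 6, 0), (1, 0, 8, 1),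
  (1, 0, 10, 1), (1, 0, 14, 2), (1, 0, 18, 2), (1, 0, 26, 3),
  (2, 0, 4, 0), (2, 0, 5, 0), (2, 0, 6, 0), (2, 0, 8, 1),
  (2, 0, 10, 1), (2, 0, 14, 2), (2, 0, 18, 2), (2, 0, 26, 3),
  (3, 1, 4, 0), (3, 1, 5, 0), (3, 1, 6, 0), (3, 1, 8, 1),
  (3, 1, 10, 1), (3, 1, 14, 2), (3, 1, 18, 2), (3, 1, 26, 3),
  (5, 2, 4, 0), (5, 2, 5, 0), (5, 2, 6, 0), (5, 2, 8, 1),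
  (5, 2, 10, 1), (5, 2, 14, 2), (5, 2, 18, 2), (5, 2, 26, 3),
  (9, 3, 4, 0), (9, 3, 5, 0), (9, 3, 6, 0), (9, 3, 8, 1),
  (9, 3, 10, 1), (9, 3, 14, 2), (9, 3, 18, 2), (9, 3, 26, 3),
  (17, 4, 4, 0), (17, 4, 5, 0), (17, 4, 6, 0), (17, 4, 8, 1),
  (17, 4, 10, 1), (17, 4, 14, 2), (17, 4, 18, 2)]

-- the `for code in range(63)` loop with early return, as structural recursion over the rows
def pvLoopA (il cl : Int) : List (Int × Nat × Int × Nat) → Int → Int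
  | [], best => max best 4                              -- return max(best, _MIN_MATCH)
  | (ib, ie, cb, ce) :: rest, best =>
    if ¬ (ib ≤ il ∧ il ≤ ib + (2 ^ ie - 1)) then        -- `if not (...): continue`
      pvLoopA il cl rest best
    else
      let copy_max := cb + (2 ^ ce - 1)
      if cb ≤ cl ∧ cl ≤ copy_max then cl                -- exact match: early return
      else if copy_max ≤ cl ∧ best < copy_max then pvLoopA il cl rest copy_max
      else pvLoopA il cl rest best

def find_best_icc_copy_py (insert_length : Int) (copy_length : Int) : Int :=
  pvLoopA insert_length copy_length pvIccTable 0

-- ===== PORT B =====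
def pvCopyFull : List (Int × Int) :=
  [(4, 6), (8, 11), (14, 21), (26, 41), (50, 81), (98, 161), (194, 385), (514, 769)]
def pvCopyShort : List (Int × Int) := [(4, 6), (8, 11), (14, 21), (26, 33)]
def pvCopyTiny : List (Int × Int) := [(4, 6), (8, 11), (14, 21)]

-- the `for lo, hi in reversed(intervals)` loop with early return (applied to .reverse)
def pvScanRev (cl : Int) : List (Int × Int) → Int
  | [] => 4                                             -- return _MIN_MATCH
  | (lo, hi) :: rest => if lo ≤ cl then min cl hi else pvScanRev cl rest

def find_best_icc_copy_py_alt (insert_length : Int) (copy_length : Int) : Int :=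
  if ¬ (0 ≤ insert_length ∧ insert_length ≤ 32) then 4
  else
    pvScanRev copy_length
      (if insert_length = 0 then pvCopyFull
       else if insert_length ≤ 16 then pvCopyShort
       else pvCopyTiny).reverse

-- ===== PRECONDITION & SPEC =====
def Spec_find_best_icc_copy_py (insert_length : Int) (copy_length : Int) (out : Int) : Prop := out = find_best_icc_copy_py_alt insert_length copy_length
instance (insert_length : Int) (copy_length : Int) (out : Int) : Decidable (Spec_find_best_icc_copy_py insert_length copy_length out) := by unfold Spec_find_best_icc_copy_py; infer_instance

-- ===== CLAIM (what is proved, stated in full; the proofs are below) =====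
def Claim_equal_find_best_icc_copy_py : Prop := ∀ (insert_length : Int) (copy_length : Int), Dom_find_best_icc_copy_py insert_length copy_length → Spec_find_best_icc_copy_py insert_length copy_length (find_best_icc_copy_py insert_length copy_length)

-- ===== LEMMAS AND PROOFS =====

-- the rows of the table whose insert range contains il, reduced to (copy_base, copy_max)
def pvRowsOf (il : Int) (tbl : List (Int × Nat × Int × Nat)) : List (Int × Int) :=
  (tbl.filter fun r => decide (r.1 ≤ il ∧ il ≤ r.1 + (2 ^ r.2.1 - 1))).map
    fun r => (r.2.2.1, r.2.2.1 + (2 ^ r.2.2.2 - 1))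

-- A's loop, described via two passes over the matching rows of the table suffix.
theorem pvLoopA_char (il cl : Int) : ∀ (L : List (Int × Nat × Int × Nat)) (best : Int),
    pvLoopA il cl L best =
      if (pvRowsOf il L).any (fun p => decide (p.1 ≤ cl ∧ cl ≤ p.2)) then cl
      else max (List.foldl (fun b p => if p.2 ≤ cl then max b p.2 else b) best (pvRowsOf il L)) 4 := by
  intro L
  induction L with
  | nil => intro best; simp [pvLoopA, pvRowsOf]
  | cons r rest ih =>
    intro best
    obtain ⟨ib, ie, cb, ce⟩ := r
    by_cases hm : ib ≤ il ∧ il ≤ ib + (2 ^ ie - 1)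
    · have hA : pvLoopA il cl ((ib, ie, cb, ce) :: rest) best
          = if cb ≤ cl ∧ cl ≤ cb + (2 ^ ce - 1) then cl
            else if cb + (2 ^ ce - 1) ≤ cl ∧ best < cb + (2 ^ ce - 1)
              then pvLoopA il cl rest (cb + (2 ^ ce - 1))
              else pvLoopA il cl rest best := by
        simp [pvLoopA, hm]
      have hrows : pvRowsOf il ((ib, ie, cb, ce) :: rest)
          = (cb, cb + (2 ^ ce - 1)) :: pvRowsOf il rest := by
        simp [pvRowsOf, hm]
      rw [hA, hrows]
      by_cases hx : cb ≤ cl ∧ cl ≤ cb + (2 ^ ce - 1)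
      · simp [hx]
      · rw [if_neg hx]
        have hstep : (if cb + ((2:Int) ^ ce - 1) ≤ cl ∧ best < cb + (2 ^ ce - 1)
              then pvLoopA il cl rest (cb + (2 ^ ce - 1)) else pvLoopA il cl rest best)
            = pvLoopA il cl rest (if cb + ((2:Int) ^ ce - 1) ≤ cl
                then max best (cb + (2 ^ ce - 1)) else best) := by
          by_cases hc : cb + ((2:Int) ^ ce - 1) ≤ cl
          · by_cases hb : best < cb + ((2:Int) ^ ce - 1)
            · rw [if_pos ⟨hc, hb⟩, if_pos hc]; congr 1; omega
            · rw [if_neg (by tauto), if_pos hc]; congr 1; omega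
          · rw [if_neg (by tauto), if_neg hc]
        rw [hstep, ih]
        simp only [List.any_cons, List.foldl_cons, decide_eq_false hx, Bool.false_or]
    · have hrows : pvRowsOf il ((ib, ie, cb, ce) :: rest) = pvRowsOf il rest := by
        simp [pvRowsOf, hm]
      rw [show pvLoopA il cl ((ib, ie, cb, ce) :: rest) best = pvLoopA il cl rest best from by
        simp [pvLoopA, hm]]
      rw [ih, hrows]

-- A's two passes over the matching rows, as one expression
def pvTwoPass (cl : Int) (R : List (Int × Int)) : Int :=
  if R.any (fun p => decide (p.1 ≤ cl ∧ cl ≤ p.2)) then cl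
  else max (List.foldl (fun b p => if p.2 ≤ cl then max b p.2 else b) 0 R) 4

-- concrete matching rows per insert bucket
def pvRowsFull : List (Int × Int) :=
  [(4,4),(5,5),(6,6),(8,9),(10,11),(14,17),(18,21),(26,33),(34,41),(50,65),(66,81),
   (98,129),(130,161),(194,257),(258,385),(514,769)]
def pvRowsShort : List (Int × Int) := [(4,4),(5,5),(6,6),(8,9),(10,11),(14,17),(18,21),(26,33)]
def pvRowsTiny : List (Int × Int) := [(4,4),(5,5),(6,6),(8,9),(10,11),(14,17),(18,21)]

theorem pvRows_zero : pvRowsOf 0 pvIccTable = pvRowsFull := by decide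

theorem pvRows_short (il : Int) (h1 : 1 ≤ il) (h2 : il ≤ 16) :
    pvRowsOf il pvIccTable = pvRowsShort := by
  interval_cases il <;> decide

theorem pvRows_tiny (il : Int) (h1 : 17 ≤ il) (h2 : il ≤ 32) :
    pvRowsOf il pvIccTable = pvRowsTiny := by
  interval_cases il <;> decide

theorem pvRows_out (il : Int) (h : il < 0 ∨ 32 < il) : pvRowsOf il pvIccTable = [] := by
  have hb : ∀ r ∈ pvIccTable, (0:Int) ≤ r.1 ∧ r.1 + ((2:Int) ^ r.2.1 - 1) ≤ 32 := by decide
  unfold pvRowsOf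
  rw [List.filter_eq_nil_iff.mpr, List.map_nil]
  intro r hr
  have := hb r hr
  simp only [decide_eq_true_eq]
  omega

-- the exact-match pass finds nothing when cl misses every row
theorem pvAny_false (cl : Int) (R : List (Int × Int))
    (h : ∀ p ∈ R, ¬(p.1 ≤ cl ∧ cl ≤ p.2)) :
    R.any (fun p => decide (p.1 ≤ cl ∧ cl ≤ p.2)) = false := by
  rw [List.any_eq_false]
  intro p hp
  simpa using h p hp

-- the best-pass fold does not move when cl is below every row maximum
theorem pvFold_id (cl : Int) : ∀ (R : List (Int × Int)), (∀ p ∈ R, ¬(p.2 ≤ cl)) → ∀ b : Int,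
    List.foldl (fun b p => if p.2 ≤ cl then max b p.2 else b) b R = b := by
  intro R
  induction R with
  | nil => intro _ b; rfl
  | cons p t ih =>
    intro h b
    simp only [List.foldl_cons, if_neg (h p (by simp))]
    exact ih (fun q hq => h q (by simp [hq])) b

-- two thresholds above every row maximum drive the fold identically
theorem pvFold_both (cl cl' : Int) : ∀ (R : List (Int × Int)), (∀ p ∈ R, p.2 ≤ cl ∧ p.2 ≤ cl') → ∀ b : Int,
    List.foldl (fun b p => if p.2 ≤ cl then max b p.2 else b) b R
      = List.foldl (fun b p => if p.2 ≤ cl' then max b p.2 else b) b R := by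
  intro R
  induction R with
  | nil => intro _ b; rfl
  | cons p t ih =>
    intro h b
    simp only [List.foldl_cons, if_pos (h p (by simp)).1, if_pos (h p (by simp)).2]
    exact ih (fun q hq => h q (by simp [hq])) (max b p.2)

-- below every row, A's two passes yield the minimum match
theorem pvTwoPass_low (cl : Int) (R : List (Int × Int)) (hcl : cl < 0)
    (h : ∀ p ∈ R, 0 ≤ p.1 ∧ 0 ≤ p.2) : pvTwoPass cl R = 4 := by
  unfold pvTwoPass
  rw [pvAny_false cl R (fun p hp => by have := h p hp; omega), if_neg (by simp)]
  rw [pvFold_id cl R (fun p hp => by have := h p hp; omega) 0]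
  decide

-- above every row maximum, cl may be replaced by the bound B
theorem pvTwoPass_high (cl B : Int) (R : List (Int × Int)) (hB : B ≤ cl)
    (h : ∀ p ∈ R, p.2 < B) : pvTwoPass cl R = pvTwoPass B R := by
  unfold pvTwoPass
  rw [pvAny_false cl R (fun p hp => by have := h p hp; omega),
    pvAny_false B R (fun p hp => by have := h p hp; omega),
    pvFold_both cl B R (fun p hp => by have := h p hp; omega) 0]
  simp

-- B's reversed scan yields the minimum match below every interval
theorem pvScanRev_low (cl : Int) : ∀ (L : List (Int × Int)), (∀ q ∈ L, cl < q.1) →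
    pvScanRev cl L = 4 := by
  intro L
  induction L with
  | nil => intro _; rfl
  | cons q t ih =>
    intro h
    obtain ⟨lo, hi⟩ := q
    have hq : cl < lo := by simpa using h (lo, hi) (by simp)
    simp only [pvScanRev, if_neg (show ¬ lo ≤ cl by omega)]
    exact ih (fun r hr => h r (by simp [hr]))

-- above every interval, cl may be replaced by the bound B in B's scan
theorem pvScanRev_high (cl B : Int) (hB : B ≤ cl) : ∀ (L : List (Int × Int)),
    (∀ q ∈ L, q.1 ≤ B ∧ q.2 < B) → pvScanRev cl L = pvScanRev B L := by
  intro L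
  induction L with
  | nil => intro _; rfl
  | cons q t ih =>
    intro h
    obtain ⟨lo, hi⟩ := q
    have hq : lo ≤ B ∧ hi < B := by simpa using h (lo, hi) (by simp)
    simp only [pvScanRev, if_pos (show lo ≤ cl by omega), if_pos (show lo ≤ B by omega)]
    omega

-- each bucket's two-pass result equals B's reversed interval scan:
-- below 0 and above the bucket's top both sides are constant in cl, and the
-- bounded middle is checked exhaustively by decide
set_option maxRecDepth 100000 in
theorem pvCase_full (cl : Int) : pvTwoPass cl pvRowsFull = pvScanRev cl pvCopyFull.reverse := by
  by_cases hlo : cl < 0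
  · rw [pvTwoPass_low cl _ hlo (by decide), pvScanRev_low cl _ (by
      have : ∀ q ∈ pvCopyFull.reverse, (0:Int) ≤ q.1 := by decide
      intro q hq; have := this q hq; omega)]
  · by_cases hhi : 770 ≤ cl
    · rw [pvTwoPass_high cl 770 _ hhi (by decide), pvScanRev_high cl 770 hhi _ (by decide)]
      decide
    · have hb : ∀ n ∈ List.range 770, pvTwoPass (n : Int) pvRowsFull
          = pvScanRev (n : Int) pvCopyFull.reverse := by decide
      have := hb cl.toNat (List.mem_range.mpr (by omega))
      rwa [Int.toNat_of_nonneg (by omega)] at this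

set_option maxRecDepth 100000 in
theorem pvCase_short (cl : Int) : pvTwoPass cl pvRowsShort = pvScanRev cl pvCopyShort.reverse := by
  by_cases hlo : cl < 0
  · rw [pvTwoPass_low cl _ hlo (by decide), pvScanRev_low cl _ (by
      have : ∀ q ∈ pvCopyShort.reverse, (0:Int) ≤ q.1 := by decide
      intro q hq; have := this q hq; omega)]
  · by_cases hhi : 34 ≤ cl
    · rw [pvTwoPass_high cl 34 _ hhi (by decide), pvScanRev_high cl 34 hhi _ (by decide)]
      decide
    · have hb : ∀ n ∈ List.range 34, pvTwoPass (n : Int) pvRowsShort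
          = pvScanRev (n : Int) pvCopyShort.reverse := by decide
      have := hb cl.toNat (List.mem_range.mpr (by omega))
      rwa [Int.toNat_of_nonneg (by omega)] at this

set_option maxRecDepth 100000 in
theorem pvCase_tiny (cl : Int) : pvTwoPass cl pvRowsTiny = pvScanRev cl pvCopyTiny.reverse := by
  by_cases hlo : cl < 0
  · rw [pvTwoPass_low cl _ hlo (by decide), pvScanRev_low cl _ (by
      have : ∀ q ∈ pvCopyTiny.reverse, (0:Int) ≤ q.1 := by decide
      intro q hq; have := this q hq; omega)]
  · by_cases hhi : 22 ≤ cl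
    · rw [pvTwoPass_high cl 22 _ hhi (by decide), pvScanRev_high cl 22 hhi _ (by decide)]
      decide
    · have hb : ∀ n ∈ List.range 22, pvTwoPass (n : Int) pvRowsTiny
          = pvScanRev (n : Int) pvCopyTiny.reverse := by decide
      have := hb cl.toNat (List.mem_range.mpr (by omega))
      rwa [Int.toNat_of_nonneg (by omega)] at this

-- ===== VERDICT (by name: the statement is the Claim_ definition above) =====
theorem find_best_icc_copy_py_spec : Claim_equal_find_best_icc_copy_py := by
  intro il cl _
  show find_best_icc_copy_py il cl = find_best_icc_copy_py_alt il cl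
  rw [find_best_icc_copy_py, pvLoopA_char]
  have hE : (if (pvRowsOf il pvIccTable).any (fun p => decide (p.1 ≤ cl ∧ cl ≤ p.2)) then cl
      else max (List.foldl (fun b p => if p.2 ≤ cl then max b p.2 else b) 0 (pvRowsOf il pvIccTable)) 4)
      = pvTwoPass cl (pvRowsOf il pvIccTable) := rfl
  rw [hE, find_best_icc_copy_py_alt]
  by_cases h0 : il = 0
  · subst h0
    rw [pvRows_zero, if_neg (show ¬¬((0:Int) ≤ 0 ∧ (0:Int) ≤ 32) by norm_num)]
    exact pvCase_full cl
  · by_cases h1 : 1 ≤ il ∧ il ≤ 16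
    · rw [pvRows_short il h1.1 h1.2, if_neg (show ¬¬(0 ≤ il ∧ il ≤ 32) by omega)]
      simp only [if_neg h0, if_pos h1.2]
      exact pvCase_short cl
    · by_cases h2 : 17 ≤ il ∧ il ≤ 32
      · rw [pvRows_tiny il h2.1 h2.2, if_neg (show ¬¬(0 ≤ il ∧ il ≤ 32) by omega)]
        simp only [if_neg h0, if_neg (show ¬ il ≤ 16 by omega)]
        exact pvCase_tiny cl
      · rw [pvRows_out il (by omega), if_pos (show ¬(0 ≤ il ∧ il ≤ 32) by omega)]
        simp [pvTwoPass]
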